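-- pv_equiv track=rewrite | github.com/carlkma/esc180_coursework | misc/script/civ_diagrams.py | generate_bmd
-- ===== SOURCE A (Python) =====
-- def generate_bmd(sfd):
-- 	bmd = [(0,0)]
-- 	for i in range(1, len(sfd)):
-- 		start = sfd[i-1]
-- 		end = sfd[i]
-- 		if start[1] == end[1]:
-- 			bmd.append((end[0],bmd[-1][1]+(end[0]-start[0])*end[1]))
-- 	return bmd
-- ===== SOURCE B (Python) =====
-- def generate_bmd(sfd):
--     # Group maximal runs of equal shear value; within a run starting at x0 with
--     # value v, the moment at x is base + v*(x - x0) in closed form (telescoped),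
--     # so no per-pair increments are summed. Recursion proceeds run by run.
--     def go(rest, base):
--         if not rest:
--             return []
--         x0, v = rest[0]
--         k = 1
--         while k < len(rest) and rest[k][1] == v:
--             k += 1
--         run = rest[1:k]
--         seg = [(x, base + v * (x - x0)) for x, _ in run]
--         new_base = base + v * (run[-1][0] - x0) if run else base
--         return seg + go(rest[k:], new_base)
--     return [(0, 0)] + go(sfd, 0)
-- ===== Notes on version B (the rewrite author's own statement) =====
-- stated objective: alternative
-- what changed: Instead of A's per-pair prefix-sum that appends an increment (dx*v) read off the running total, B groups the data into maximal runs of equal shear value and emits each moment in closed form base + v*(x - run_start) (the within-run sum telescopes), recursing run by run.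
import Mathlib
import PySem

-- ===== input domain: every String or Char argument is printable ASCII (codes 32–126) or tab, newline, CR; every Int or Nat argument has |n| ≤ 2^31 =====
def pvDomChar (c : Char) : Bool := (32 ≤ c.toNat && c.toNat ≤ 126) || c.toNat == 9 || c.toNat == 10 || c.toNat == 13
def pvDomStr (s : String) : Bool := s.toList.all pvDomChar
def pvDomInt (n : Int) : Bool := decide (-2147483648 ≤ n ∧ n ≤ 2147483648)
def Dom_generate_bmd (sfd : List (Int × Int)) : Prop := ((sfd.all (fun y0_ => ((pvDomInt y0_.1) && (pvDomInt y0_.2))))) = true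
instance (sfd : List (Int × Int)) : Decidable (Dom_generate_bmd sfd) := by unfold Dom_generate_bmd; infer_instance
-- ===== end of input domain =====

-- B replaces A's per-pair prefix-sum (running total read from bmd[-1]) by run-length
-- grouping: maximal runs of equal shear value, each moment emitted in closed form
-- base + v*(x - run_start); alternative decomposition, same cost.

-- ===== PORT A =====
def generate_bmd (sfd : List (Int × Int)) : List (Int × Int) :=
  (PySem.List.pyRange 1 (sfd.length : Int) 1).foldl (fun bmd i =>
    let start := (PySem.List.pyGet? sfd (i - 1)).getD (0, 0)
    let e := (PySem.List.pyGet? sfd i).getD (0, 0)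
    if start.2 == e.2 then
      bmd ++ [(e.1, ((PySem.List.pyGet? bmd (-1)).getD (0, 0)).2 + (e.1 - start.1) * e.2)]
    else bmd) [(0, 0)]

-- ===== PORT B =====
-- go(rest, base): the run at the head is rest[1:k] (the while loop scanning equal
-- shear values = takeWhile on the tail); each point of the run gets its moment in
-- closed form, then recurse on the remainder with the run's final moment as base.
def goBmd (rest : List (Int × Int)) (base : Int) : List (Int × Int) :=
  match rest with
  | [] => []
  | (x0, v) :: t =>
    let run := t.takeWhile (fun p => p.2 == v)
    let seg := run.map (fun p => (p.1, base + v * (p.1 - x0)))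
    let newBase := match run.getLast? with
      | some l => base + v * (l.1 - x0)
      | none => base
    seg ++ goBmd (t.dropWhile (fun p => p.2 == v)) newBase
termination_by rest.length
decreasing_by
  simp only [List.length_cons]
  exact Nat.lt_succ_of_le (t.length_dropWhile_le _)

def generate_bmd_alt (sfd : List (Int × Int)) : List (Int × Int) :=
  (0, 0) :: goBmd sfd 0

-- ===== PRECONDITION & SPEC =====
def Spec_generate_bmd (sfd : List (Int × Int)) (out : List (Int × Int)) : Prop := out = generate_bmd_alt sfd
instance (sfd : List (Int × Int)) (out : List (Int × Int)) : Decidable (Spec_generate_bmd sfd out) := by unfold Spec_generate_bmd; infer_instance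

-- ===== CLAIM (what is proved, stated in full; the proofs are below) =====
def Claim_equal_generate_bmd : Prop := ∀ (sfd : List (Int × Int)), Dom_generate_bmd sfd → Spec_generate_bmd sfd (generate_bmd sfd)

-- ===== LEMMAS AND PROOFS =====

-- A's loop body as a function of the consecutive pair (start, end)
def stepA (bmd : List (Int × Int)) (p : (Int × Int) × (Int × Int)) : List (Int × Int) :=
  if p.1.2 == p.2.2 then
    bmd ++ [(p.2.1, ((PySem.List.pyGet? bmd (-1)).getD (0, 0)).2 + (p.2.1 - p.1.1) * p.2.2)]
  else bmd

-- A's increments as an explicit prefix-sum over the filtered pair list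
def accumFrom (m : Int) : List (Int × Int) → List (Int × Int)
  | [] => []
  | (x, d) :: t => (x, m + d) :: accumFrom (m + d) t

def incF (p : (Int × Int) × (Int × Int)) : Option (Int × Int) :=
  if p.1.2 == p.2.2 then some (p.2.1, (p.2.1 - p.1.1) * p.2.2) else none

lemma foldl_stepA (pairs : List ((Int × Int) × (Int × Int))) (pre : List (Int × Int))
    (last : Int × Int) :
    pairs.foldl stepA (pre ++ [last]) =
      (pre ++ [last]) ++ accumFrom last.2 (pairs.filterMap incF) := by
  induction pairs generalizing pre last with
  | nil => simp [accumFrom]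
  | cons p t ih =>
    by_cases h : p.1.2 = p.2.2
    · have : stepA (pre ++ [last]) p =
        (pre ++ [last]) ++ [(p.2.1, last.2 + (p.2.1 - p.1.1) * p.2.2)] := by
        simp [stepA, h, PySem.List.pyGet?_neg_one_append_singleton]
      rw [List.foldl_cons, this, List.append_assoc,
        show pre ++ ([last] ++ [(p.2.1, last.2 + (p.2.1 - p.1.1) * p.2.2)]) =
          (pre ++ [last]) ++ [(p.2.1, last.2 + (p.2.1 - p.1.1) * p.2.2)] by simp,
        ih]
      simp [accumFrom, incF, h]
    · rw [List.foldl_cons, show stepA (pre ++ [last]) p = pre ++ [last] by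
        simp [stepA, h], ih]
      simp [incF, if_neg h]

-- A's indexed range-fold equals a fold of stepA over the zip of consecutive pairs
lemma range_fold_eq (sfd : List (Int × Int)) (init : List (Int × Int)) :
    (PySem.List.pyRange 1 (sfd.length : Int) 1).foldl (fun bmd i =>
      let start := (PySem.List.pyGet? sfd (i - 1)).getD (0, 0)
      let e := (PySem.List.pyGet? sfd i).getD (0, 0)
      if start.2 == e.2 then
        bmd ++ [(e.1, ((PySem.List.pyGet? bmd (-1)).getD (0, 0)).2 + (e.1 - start.1) * e.2)]
      else bmd) init = (sfd.zip sfd.tail).foldl stepA init := by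
  have aux : ∀ (n : Nat), n ≤ sfd.length →
      (PySem.List.pyRange 1 (n : Int) 1).foldl (fun bmd i =>
        let start := (PySem.List.pyGet? sfd (i - 1)).getD (0, 0)
        let e := (PySem.List.pyGet? sfd i).getD (0, 0)
        if start.2 == e.2 then
          bmd ++ [(e.1, ((PySem.List.pyGet? bmd (-1)).getD (0, 0)).2 + (e.1 - start.1) * e.2)]
        else bmd) init = ((sfd.zip sfd.tail).take (n - 1)).foldl stepA init := by
    intro n hn
    induction n with
    | zero => simp [PySem.List.pyRange_one_eq_nil]
    | succ m ih =>
      rcases Nat.eq_zero_or_pos m with hm | hm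
      · subst hm
        simp [PySem.List.pyRange_one_eq_nil]
      · have hm1 : m < sfd.length := by omega
        have hcast : ((m + 1 : Nat) : Int) = (m : Int) + 1 := by push_cast; ring
        rw [hcast, PySem.List.pyRange_one_succ_right (by exact_mod_cast Nat.one_le_iff_ne_zero.mpr (by omega)),
          List.foldl_append, ih (by omega)]
        have hzlen : m - 1 < (sfd.zip sfd.tail).length := by
          rw [List.length_zip, List.length_tail]; omega
        have htake : (sfd.zip sfd.tail).take (m + 1 - 1) =
            (sfd.zip sfd.tail).take (m - 1) ++ [(sfd.zip sfd.tail)[m - 1]] := by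
          have : m + 1 - 1 = (m - 1) + 1 := by omega
          rw [this, List.take_add_one, List.getElem?_eq_getElem hzlen]
          rfl
        rw [htake, List.foldl_append]
        have hsm : (sfd.zip sfd.tail)[m - 1] = (sfd[m - 1], sfd[m]) := by
          rw [List.getElem_zip]
          congr 1
          rw [List.getElem_tail]
          congr 1
          omega
        simp only [List.foldl_cons, List.foldl_nil, hsm]
        have h1 : PySem.List.pyGet? sfd ((m : Int) - 1) = some sfd[m - 1] := by
          rw [show ((m : Int) - 1) = ((m - 1 : Nat) : Int) by omega, PySem.List.pyGet?_natCast,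
            List.getElem?_eq_getElem (by omega)]
        have h2 : PySem.List.pyGet? sfd (m : Int) = some sfd[m] := by
          rw [PySem.List.pyGet?_natCast, List.getElem?_eq_getElem hm1]
        simp only [h1, h2, Option.getD_some, stepA]
  have := aux sfd.length le_rfl
  rwa [List.take_of_length_le (by rw [List.length_zip, List.length_tail]; omega)] at this

-- goBmd on a cons, written out (the run, its closed-form segment, the new base)
lemma goBmd_cons (x0 v : Int) (t : List (Int × Int)) (base : Int) :
    goBmd ((x0, v) :: t) base =
      (t.takeWhile (fun p => p.2 == v)).map (fun p => (p.1, base + v * (p.1 - x0)))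
        ++ goBmd (t.dropWhile (fun p => p.2 == v))
            (match (t.takeWhile (fun p => p.2 == v)).getLast? with
             | some l => base + v * (l.1 - x0)
             | none => base) := by
  rw [goBmd]

-- the prefix-sum of A's filtered increments equals B's run-grouped closed form
lemma accum_eq_goBmd (sfd : List (Int × Int)) (base : Int) :
    accumFrom base ((sfd.zip sfd.tail).filterMap incF) = goBmd sfd base := by
  induction sfd generalizing base with
  | nil => simp [goBmd, accumFrom]
  | cons a t ih =>
    obtain ⟨x0, v⟩ := a
    rcases t with _ | ⟨⟨x1, w⟩, t'⟩
    · simp [goBmd, accumFrom]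
    · rw [List.tail_cons, List.zip_cons_cons, List.filterMap_cons]
      by_cases hw : v = w
      · subst hw
        rw [show incF ((x0, v), (x1, v)) = some (x1, (x1 - x0) * v) from by simp [incF]]
        have hzip : ((x1, v) :: t').zip t' = ((x1, v) :: t').zip ((x1, v) :: t').tail := rfl
        rw [show accumFrom base ((x1, (x1 - x0) * v) :: ((((x1, v) :: t').zip t').filterMap incF))
              = (x1, base + (x1 - x0) * v)
                :: accumFrom (base + (x1 - x0) * v) ((((x1, v) :: t').zip t').filterMap incF)
            from rfl, hzip, ih]
        rw [goBmd_cons x0 v ((x1, v) :: t') base, goBmd_cons x1 v t' (base + (x1 - x0) * v)]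
        rw [show ((x1, v) :: t').takeWhile (fun p => p.2 == v)
              = (x1, v) :: t'.takeWhile (fun p => p.2 == v) from by simp]
        rw [show ((x1, v) :: t').dropWhile (fun p => p.2 == v)
              = t'.dropWhile (fun p => p.2 == v) from by simp]
        rw [List.map_cons]
        have hmap : (t'.takeWhile (fun p => p.2 == v)).map
              (fun p => (p.1, base + (x1 - x0) * v + v * (p.1 - x1)))
            = (t'.takeWhile (fun p => p.2 == v)).map
              (fun p => (p.1, base + v * (p.1 - x0))) := by
          apply List.map_congr_left
          intro p _
          have : base + (x1 - x0) * v + v * (p.1 - x1) = base + v * (p.1 - x0) := by ring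
          rw [this]
        have hbase : (match ((x1, v) :: t'.takeWhile (fun p => p.2 == v)).getLast? with
              | some l => base + v * (l.1 - x0)
              | none => base)
            = (match (t'.takeWhile (fun p => p.2 == v)).getLast? with
              | some l => base + (x1 - x0) * v + v * (l.1 - x1)
              | none => base + (x1 - x0) * v) := by
          rcases htw : t'.takeWhile (fun p => p.2 == v) with _ | ⟨c, tw'⟩
          · rw [htw]
            show base + v * (x1 - x0) = base + (x1 - x0) * v
            ring
          · rw [htw, List.getLast?_cons_cons]
            rcases hlast : (c :: tw').getLast? with _ | l
            · exact absurd hlast (by simp)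
            · show base + v * (l.1 - x0) = base + (x1 - x0) * v + v * (l.1 - x1)
              ring
        rw [hmap, hbase]
        have hhead : base + (x1 - x0) * v = base + v * (x1 - x0) := by ring
        rw [hhead]
        rfl
      · have hw' : ¬(w = v) := fun h => hw h.symm
        rw [show incF ((x0, v), (x1, w)) = none from by simp [incF, hw]]
        have hzip : ((x1, w) :: t').zip t' = ((x1, w) :: t').zip ((x1, w) :: t').tail := rfl
        rw [hzip, ih]
        rw [goBmd_cons x0 v ((x1, w) :: t') base]
        rw [show ((x1, w) :: t').takeWhile (fun p => p.2 == v) = [] from by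
          simp [hw']]
        rw [show ((x1, w) :: t').dropWhile (fun p => p.2 == v) = (x1, w) :: t' from by
          simp [hw']]
        rfl

-- ===== VERDICT (by name: the statement is the Claim_ definition above) =====
theorem generate_bmd_spec : Claim_equal_generate_bmd := by
  intro sfd _
  unfold Spec_generate_bmd generate_bmd generate_bmd_alt
  rw [range_fold_eq]
  have h := foldl_stepA (sfd.zip sfd.tail) [] ((0 : Int), (0 : Int))
  simp only [List.nil_append] at h
  rw [h, accum_eq_goBmd]
  rfl
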